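-- pv_equiv track=rewrite | github.com/MinhThuan2406/MetadataFetcher | metadata_fetcher/installation_parser.py | group_and_clean_docker_commands
-- ===== SOURCE A (Python) =====
-- from typing import Optional, List, Tuple
--
-- def group_and_clean_docker_commands(cmds: List[dict], method: str) -> List[dict]:
--     # Group by platform/use-case and deduplicate by normalized command
--     unique = {}
--     for entry in cmds:
--         cmd = entry["command"].strip()
--         # Heuristic: label platform
--         if "standalone.bat" in cmd or "Invoke-WebRequest" in cmd:
--             platform = "windows"
--         elif "curl" in cmd or "bash standalone_embed.sh" in cmd or "$" in cmd:
--             platform = "linux/macOS/WSL2"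
--         elif "wget" in cmd:
--             platform = "linux/macOS/WSL2"
--         else:
--             platform = "any"
--         norm = cmd.replace(' ', '').replace('\n', '').lower()
--         if norm not in unique:
--             entry["platform"] = platform
--             unique[norm] = entry
--     # Prioritize: Windows first, then Linux/macOS/WSL2, then any
--     ordered = sorted(unique.values(), key=lambda x: (x["platform"] != "windows", x["platform"] != "linux/macOS/WSL2", x["platform"]))
--     return ordered
-- ===== SOURCE B (Python) =====
-- def group_and_clean_docker_commands(cmds, method):
--     # Same dedup/labelling pass; then a single-pass three-way partition instead of sorted()
--     unique = {}
--     for entry in cmds: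
--         cmd = entry["command"].strip()
--         if "standalone.bat" in cmd or "Invoke-WebRequest" in cmd:
--             platform = "windows"
--         elif "curl" in cmd or "bash standalone_embed.sh" in cmd or "$" in cmd:
--             platform = "linux/macOS/WSL2"
--         elif "wget" in cmd:
--             platform = "linux/macOS/WSL2"
--         else:
--             platform = "any"
--         norm = cmd.replace(' ', '').replace('\n', '').lower()
--         if norm not in unique:
--             entry["platform"] = platform
--             unique[norm] = entry
--     windows, linux, other = [], [], []
--     for e in unique.values():
--         if e["platform"] == "windows":
--             windows.append(e)
--         elif e["platform"] == "linux/macOS/WSL2":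
--             linux.append(e)
--         else:
--             other.append(e)
--     return windows + linux + other
-- ===== Notes on version B (the rewrite author's own statement) =====
-- stated objective: simpler
-- what changed: The final sorted() with a three-component tuple key is replaced by a single stable pass that partitions the deduplicated entries into windows / linux-macOS-WSL2 / other buckets and concatenates them; the dedup loop is unchanged.
-- outside the precondition, e.g. on group_and_clean_docker_commands([{}], 'docker'): A raises KeyError, B raises KeyError
import Mathlib
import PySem

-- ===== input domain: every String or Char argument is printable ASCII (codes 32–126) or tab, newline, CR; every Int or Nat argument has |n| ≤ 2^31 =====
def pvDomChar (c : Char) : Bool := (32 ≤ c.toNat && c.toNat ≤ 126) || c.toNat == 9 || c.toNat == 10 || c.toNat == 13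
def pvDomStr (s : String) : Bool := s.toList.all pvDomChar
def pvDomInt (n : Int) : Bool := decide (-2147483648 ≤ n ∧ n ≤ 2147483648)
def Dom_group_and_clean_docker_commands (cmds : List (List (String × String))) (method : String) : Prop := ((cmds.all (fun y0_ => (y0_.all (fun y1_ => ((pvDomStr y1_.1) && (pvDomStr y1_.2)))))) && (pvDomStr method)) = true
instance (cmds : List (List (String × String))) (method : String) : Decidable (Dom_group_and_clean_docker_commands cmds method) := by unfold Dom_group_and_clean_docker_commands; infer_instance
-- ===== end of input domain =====

-- B replaces the final sorted() by a single-pass three-way bucket partition (same order by stability); equivalence is about the RETURN value (the Python mutates the input dicts' "platform" field; B performs the same mutation).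

-- ===== SHARED HELPERS (the dedup/labelling loop is textually identical in A and B) =====
def pvPlatform (cmd : String) : String :=
  if PySem.Str.isIn "standalone.bat" cmd || PySem.Str.isIn "Invoke-WebRequest" cmd then "windows"
  else if PySem.Str.isIn "curl" cmd || PySem.Str.isIn "bash standalone_embed.sh" cmd || PySem.Str.isIn "$" cmd then "linux/macOS/WSL2"
  else if PySem.Str.isIn "wget" cmd then "linux/macOS/WSL2"
  else "any"

-- the dedup loop body: entry["command"] is read with getD "" (Pre_ guarantees the key is present, so this matches Python)
def pvStep (unique : PySem.Dict String (PySem.Dict String String)) (entry : List (String × String)) : PySem.Dict String (PySem.Dict String String) :=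
  let e : PySem.Dict String String := PySem.Dict.mk entry
  let cmd := PySem.Str.strip (e.getD "command" "")
  let platform := pvPlatform cmd
  let norm := PySem.Str.lower (PySem.Str.replace (PySem.Str.replace cmd " " "") "\n" "")
  if !(unique.contains norm) then unique.insert norm (e.insert "platform" platform) else unique

def pvUnique (cmds : List (List (String × String))) : PySem.Dict String (PySem.Dict String String) :=
  cmds.foldl pvStep PySem.Dict.empty

-- ===== PORT A =====
-- Python's sort key is the tuple (x["platform"] != "windows", x["platform"] != "linux/macOS/WSL2", x["platform"]),
-- compared lexicographically with False < True: exactly the Lex order on Bool × Bool × String.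
-- x["platform"] is read with getD "" (every stored entry has the key set, so this matches Python).
def pvKeyA (x : PySem.Dict String String) : Lex (Bool × Lex (Bool × String)) :=
  toLex (decide (x.getD "platform" "" ≠ "windows"),
    toLex (decide (x.getD "platform" "" ≠ "linux/macOS/WSL2"), x.getD "platform" ""))

def group_and_clean_docker_commands (cmds : List (List (String × String))) (method : String) : List (List (String × String)) :=
  let unique := pvUnique cmds
  let ordered := PySem.List.sorted unique.values pvKeyA false
  ordered.map PySem.Dict.items

-- ===== PORT B =====
def group_and_clean_docker_commands_alt (cmds : List (List (String × String))) (method : String) : List (List (String × String)) :=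
  let unique := pvUnique cmds
  let buckets := unique.values.foldl
    (fun (acc : List (PySem.Dict String String) × List (PySem.Dict String String) × List (PySem.Dict String String)) e =>
      if e.getD "platform" "" == "windows" then (acc.1 ++ [e], acc.2.1, acc.2.2)
      else if e.getD "platform" "" == "linux/macOS/WSL2" then (acc.1, acc.2.1 ++ [e], acc.2.2)
      else (acc.1, acc.2.1, acc.2.2 ++ [e]))
    ([], [], [])
  (buckets.1 ++ buckets.2.1 ++ buckets.2.2).map PySem.Dict.items

-- ===== PRECONDITION & SPEC =====
-- Pre_ excludes exactly the inputs where some entry lacks a "command" key: there Python A (and Python B) raise KeyError.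
def Pre_group_and_clean_docker_commands (cmds : List (List (String × String))) (method : String) : Prop :=
  ∀ e ∈ cmds, e.any (fun p => p.1 == "command") = true
instance (cmds : List (List (String × String))) (method : String) : Decidable (Pre_group_and_clean_docker_commands cmds method) := by unfold Pre_group_and_clean_docker_commands; infer_instance

def pvWitness_group_and_clean_docker_commands : (List (List (String × String))) × String :=
  ([[("command", "curl -sfL install.sh")], [("command", "standalone.bat start")]], "docker")

def Spec_group_and_clean_docker_commands (cmds : List (List (String × String))) (method : String) (out : List (List (String × String))) : Prop := out = group_and_clean_docker_commands_alt cmds method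
instance (cmds : List (List (String × String))) (method : String) (out : List (List (String × String))) : Decidable (Spec_group_and_clean_docker_commands cmds method out) := by unfold Spec_group_and_clean_docker_commands; infer_instance

-- ===== CLAIM (what is proved, stated in full; the proofs are below) =====
def Claim_equal_group_and_clean_docker_commands : Prop := ∀ (cmds : List (List (String × String))) (method : String), Dom_group_and_clean_docker_commands cmds method → Pre_group_and_clean_docker_commands cmds method → Spec_group_and_clean_docker_commands cmds method (group_and_clean_docker_commands cmds method)

-- ===== LEMMAS AND PROOFS =====

-- insertBy skips a prefix it is not "before" and lands in front of a suffix it is "before": stability made explicit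
lemma pv_insertBy_skip {α : Type} (before : α → α → Bool) (x : α) (l r : List α)
    (hl : ∀ y ∈ l, before x y = false) (hr : ∀ y ∈ r, before x y = true) :
    PySem.List.insertBy before x (l ++ r) = l ++ x :: r := by
  induction l with
  | nil =>
    cases r with
    | nil => simp [PySem.List.insertBy]
    | cons y ys => simp [PySem.List.insertBy, hr y (by simp)]
  | cons a l ih =>
    simp [PySem.List.insertBy, hl a (by simp)]
    exact ih (fun y hy => hl y (by simp [hy]))

-- a stable sort whose keys take only three values k1 < k2 < k3 is the three-way partition
lemma pv_sorted_three {α κ : Type} [LT κ] [DecidableLT κ] [DecidableEq κ] (key : α → κ) (k1 k2 k3 : κ)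
    (h12 : k1 < k2) (h13 : k1 < k3) (h23 : k2 < k3)
    (n11 : ¬ k1 < k1) (n21 : ¬ k2 < k1) (n22 : ¬ k2 < k2)
    (n31 : ¬ k3 < k1) (n32 : ¬ k3 < k2) (n33 : ¬ k3 < k3)
    (xs : List α) (hall : ∀ x ∈ xs, key x = k1 ∨ key x = k2 ∨ key x = k3) :
    PySem.List.sorted xs key false =
      xs.filter (fun x => decide (key x = k1)) ++ xs.filter (fun x => decide (key x = k2)) ++ xs.filter (fun x => decide (key x = k3)) := by
  rw [PySem.List.sorted_eq_foldl_insertBy]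
  induction xs using List.reverseRecOn with
  | nil => simp
  | append_singleton xs x ih =>
    rw [List.foldl_append, List.foldl_cons, List.foldl_nil,
      ih (fun y hy => hall y (by simp [hy]))]
    have m1 : ∀ y ∈ xs.filter (fun x => decide (key x = k1)), key y = k1 := by
      intro y hy; simpa using (List.mem_filter.mp hy).2
    have m2 : ∀ y ∈ xs.filter (fun x => decide (key x = k2)), key y = k2 := by
      intro y hy; simpa using (List.mem_filter.mp hy).2
    have m3 : ∀ y ∈ xs.filter (fun x => decide (key x = k3)), key y = k3 := by
      intro y hy; simpa using (List.mem_filter.mp hy).2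
    have ne12 : k1 ≠ k2 := fun h => n22 (h ▸ h12)
    have ne13 : k1 ≠ k3 := fun h => n33 (h ▸ h13)
    have ne23 : k2 ≠ k3 := fun h => n33 (h ▸ h23)
    rcases hall x (by simp) with hk | hk | hk
    · rw [show xs.filter (fun x => decide (key x = k1)) ++ xs.filter (fun x => decide (key x = k2)) ++ xs.filter (fun x => decide (key x = k3))
          = xs.filter (fun x => decide (key x = k1)) ++ (xs.filter (fun x => decide (key x = k2)) ++ xs.filter (fun x => decide (key x = k3))) by simp]
      rw [pv_insertBy_skip _ x _ _
        (by intro y hy; simp [m1 y hy, hk, n11])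
        (by intro y hy; rcases List.mem_append.mp hy with h | h
            · simp [m2 y h, hk, h12]
            · simp [m3 y h, hk, h13])]
      simp [List.filter_append, hk, ne12, ne13]
    · rw [show xs.filter (fun x => decide (key x = k1)) ++ xs.filter (fun x => decide (key x = k2)) ++ xs.filter (fun x => decide (key x = k3))
          = (xs.filter (fun x => decide (key x = k1)) ++ xs.filter (fun x => decide (key x = k2))) ++ xs.filter (fun x => decide (key x = k3)) by simp]
      rw [pv_insertBy_skip _ x _ _
        (by intro y hy; rcases List.mem_append.mp hy with h | h
            · simp [m1 y h, hk, n21]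
            · simp [m2 y h, hk, n22])
        (by intro y hy; simp [m3 y hy, hk, h23])]
      simp [List.filter_append, hk, ne12.symm, ne23]
    · rw [show xs.filter (fun x => decide (key x = k1)) ++ xs.filter (fun x => decide (key x = k2)) ++ xs.filter (fun x => decide (key x = k3))
          = (xs.filter (fun x => decide (key x = k1)) ++ xs.filter (fun x => decide (key x = k2)) ++ xs.filter (fun x => decide (key x = k3))) ++ [] by simp]
      rw [pv_insertBy_skip _ x _ _
        (by intro y hy; rcases List.mem_append.mp hy with h | h
            · rcases List.mem_append.mp h with h' | h'
              · simp [m1 y h', hk, n31]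
              · simp [m2 y h', hk, n32]
            · simp [m3 y h, hk, n33])
        (by intro y hy; simp at hy)]
      simp [List.filter_append, hk, ne13.symm, ne23.symm]

-- B's three-accumulator loop is three filters
lemma pv_foldl_buckets {α : Type} (p q : α → Bool) (vals : List α) (w l o : List α) :
    vals.foldl (fun (acc : List α × List α × List α) e =>
        if p e then (acc.1 ++ [e], acc.2.1, acc.2.2)
        else if q e then (acc.1, acc.2.1 ++ [e], acc.2.2)
        else (acc.1, acc.2.1, acc.2.2 ++ [e])) (w, l, o)
      = (w ++ vals.filter p, l ++ vals.filter (fun e => !p e && q e), o ++ vals.filter (fun e => !p e && !q e)) := by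
  induction vals generalizing w l o with
  | nil => simp
  | cons a t ih =>
    by_cases hp : p a
    · simp [List.foldl_cons, hp, ih]
    · by_cases hq : q a <;> simp [List.foldl_cons, hp, hq, ih]

lemma pv_platform_cases (cmd : String) :
    pvPlatform cmd = "windows" ∨ pvPlatform cmd = "linux/macOS/WSL2" ∨ pvPlatform cmd = "any" := by
  unfold pvPlatform; split_ifs <;> simp

-- every value stored by the dedup loop carries one of the three platform labels
lemma pv_unique_platform (cmds : List (List (String × String))) :
    ∀ x ∈ (pvUnique cmds).values,
      x.getD "platform" "" = "windows" ∨ x.getD "platform" "" = "linux/macOS/WSL2" ∨ x.getD "platform" "" = "any" := by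
  unfold pvUnique
  have H : ∀ (l : List (List (String × String))) (d : PySem.Dict String (PySem.Dict String String)),
      (∀ x ∈ d.values, x.getD "platform" "" = "windows" ∨ x.getD "platform" "" = "linux/macOS/WSL2" ∨ x.getD "platform" "" = "any") →
      ∀ x ∈ (l.foldl pvStep d).values, x.getD "platform" "" = "windows" ∨ x.getD "platform" "" = "linux/macOS/WSL2" ∨ x.getD "platform" "" = "any" := by
    intro l
    induction l with
    | nil => intro d hd; exact hd
    | cons entry rest ih =>
      intro d hd
      rw [List.foldl_cons]
      apply ih
      intro x hx
      unfold pvStep at hx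
      simp only [] at hx
      split at hx
      · rcases PySem.Dict.mem_values_insert _ _ _ _ hx with rfl | h
        · rw [PySem.Dict.getD_insert_self]
          exact pv_platform_cases _
        · exact hd x h
      · exact hd x hx
  exact H cmds PySem.Dict.empty (by simp [PySem.Dict.values, PySem.Dict.empty])

theorem pv_main (cmds : List (List (String × String))) (method : String) :
    group_and_clean_docker_commands cmds method = group_and_clean_docker_commands_alt cmds method := by
  have hall3 := pv_unique_platform cmds
  have h12 : (toLex (false, toLex (true, "windows")) : Lex (Bool × Lex (Bool × String))) < toLex (true, toLex (false, "linux/macOS/WSL2")) := by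
    rw [Prod.Lex.toLex_lt_toLex]; left; exact Bool.false_lt_true
  have h13 : (toLex (false, toLex (true, "windows")) : Lex (Bool × Lex (Bool × String))) < toLex (true, toLex (true, "any")) := by
    rw [Prod.Lex.toLex_lt_toLex]; left; exact Bool.false_lt_true
  have h23 : (toLex (true, toLex (false, "linux/macOS/WSL2")) : Lex (Bool × Lex (Bool × String))) < toLex (true, toLex (true, "any")) := by
    rw [Prod.Lex.toLex_lt_toLex]; right
    exact ⟨rfl, by rw [Prod.Lex.toLex_lt_toLex]; left; exact Bool.false_lt_true⟩
  have nlt : ∀ (a b : Bool) (s : String), ¬ (toLex (a, toLex (b, s)) : Lex (Bool × Lex (Bool × String))) < toLex (a, toLex (b, s)) := by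
    intro a b s h
    rw [Prod.Lex.toLex_lt_toLex] at h
    rcases h with h | ⟨-, h⟩
    · exact lt_irrefl _ h
    · rw [Prod.Lex.toLex_lt_toLex] at h
      rcases h with h | ⟨-, h⟩
      · exact lt_irrefl _ h
      · exact lt_irrefl _ h
  have n21 : ¬ (toLex (true, toLex (false, "linux/macOS/WSL2")) : Lex (Bool × Lex (Bool × String))) < toLex (false, toLex (true, "windows")) := by
    intro h
    rw [Prod.Lex.toLex_lt_toLex] at h
    rcases h with h | ⟨h, -⟩
    · exact absurd h (by simp [Bool.lt_iff])
    · exact absurd h (by simp)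
  have n31 : ¬ (toLex (true, toLex (true, "any")) : Lex (Bool × Lex (Bool × String))) < toLex (false, toLex (true, "windows")) := by
    intro h
    rw [Prod.Lex.toLex_lt_toLex] at h
    rcases h with h | ⟨h, -⟩
    · exact absurd h (by simp [Bool.lt_iff])
    · exact absurd h (by simp)
  have n32 : ¬ (toLex (true, toLex (true, "any")) : Lex (Bool × Lex (Bool × String))) < toLex (true, toLex (false, "linux/macOS/WSL2")) := by
    intro h
    rw [Prod.Lex.toLex_lt_toLex] at h
    rcases h with h | ⟨-, h⟩
    · exact lt_irrefl _ h
    · rw [Prod.Lex.toLex_lt_toLex] at h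
      rcases h with h | ⟨h, -⟩
      · exact absurd h (by simp [Bool.lt_iff])
      · exact absurd h (by simp)
  have hkey : ∀ x ∈ (pvUnique cmds).values,
      pvKeyA x = toLex (false, toLex (true, "windows")) ∨
      pvKeyA x = toLex (true, toLex (false, "linux/macOS/WSL2")) ∨
      pvKeyA x = toLex (true, toLex (true, "any")) := by
    intro x hx
    rcases hall3 x hx with h | h | h
    · left; simp [pvKeyA, h]
    · right; left; simp [pvKeyA, h]
    · right; right; simp [pvKeyA, h]
  have f1 : (pvUnique cmds).values.filter (fun x => decide (pvKeyA x = toLex (false, toLex (true, "windows"))))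
      = (pvUnique cmds).values.filter (fun e => e.getD "platform" "" == "windows") := by
    apply List.filter_congr; intro x hx
    rcases hall3 x hx with h | h | h <;> simp [pvKeyA, h]
  have f2 : (pvUnique cmds).values.filter (fun x => decide (pvKeyA x = toLex (true, toLex (false, "linux/macOS/WSL2"))))
      = (pvUnique cmds).values.filter (fun e => !(e.getD "platform" "" == "windows") && (e.getD "platform" "" == "linux/macOS/WSL2")) := by
    apply List.filter_congr; intro x hx
    rcases hall3 x hx with h | h | h <;> simp [pvKeyA, h]
  have f3 : (pvUnique cmds).values.filter (fun x => decide (pvKeyA x = toLex (true, toLex (true, "any"))))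
      = (pvUnique cmds).values.filter (fun e => !(e.getD "platform" "" == "windows") && !(e.getD "platform" "" == "linux/macOS/WSL2")) := by
    apply List.filter_congr; intro x hx
    rcases hall3 x hx with h | h | h <;> simp [pvKeyA, h]
  simp only [group_and_clean_docker_commands, group_and_clean_docker_commands_alt]
  rw [pv_sorted_three pvKeyA _ _ _ h12 h13 h23 (nlt _ _ _) n21 (nlt _ _ _) n31 n32 (nlt _ _ _) _ hkey,
    pv_foldl_buckets, f1, f2, f3]
  simp [List.append_assoc]

-- ===== VERDICT (by name: the statement is the Claim_ definition above) =====
theorem group_and_clean_docker_commands_spec : Claim_equal_group_and_clean_docker_commands := by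
  intro cmds method _ _
  unfold Spec_group_and_clean_docker_commands
  exact pv_main cmds method
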